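-- pv_equiv track=rewrite | github.com/codrsquad/setupmeta | setupmeta/toml.py | normalized_toml
-- ===== SOURCE A (Python) =====
-- def toml_key_value(line):
--     line = line and line.strip()
--     if not line:
--         return None, None
--     if '=' not in line:
--         return None, line
--     key, _, value = line.partition('=')
--     key = key.strip()
--     value = value.strip()
--     if not key or not value:
--         return None, None
--     key = toml_key(key)
--     if key is None:
--         return None, line
--     return key, value
--
-- def toml_accumulated_value(acc, text):
--     if acc:
--         return "%s %s" % (acc, text)
--     return text
--
-- def is_toml_section(line):
--     if not line or len(line) < 3:
--         return False
--     if line[0] == '[' and line[-1] == ']':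
--         line = line[1:-1]
--         if len(line) >= 3 and line[0] == '[' and line[-1] == ']':
--             line = line[1:-1]
--         return toml_key(line) is not None
--
-- def normalized_toml(lines):
--     """ Collapse toml multi-lines into one line """
--     if not lines:
--         return None
--     result = []
--     prev_key = None
--     acc = None
--     for line in lines:
--         key, value = toml_key_value(line)
--         if key or is_toml_section(line):
--             if acc:
--                 if prev_key:
--                     result.append("%s=%s" % (prev_key, acc))
--                 else:
--                     result.append(acc)
--                 acc = None
--             prev_key = key
--             acc = toml_accumulated_value(acc, value)
--             continue
--         acc = toml_accumulated_value(acc, line)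
--     if prev_key:
--         result.append("%s=%s" % (prev_key, acc))
--     return result
--
-- def toml_key(text):
--     text = text and text.strip()
--     if not text or len(text) < 2:
--         return text
--     fc = text[0]
--     if fc == '"' or fc == "'":
--         if text[-1] != fc:
--             return None
--         return text[1:-1]
--     return text
-- ===== SOURCE B (Python) =====
-- def toml_key_value(line):
--     line = line and line.strip()
--     if not line:
--         return None, None
--     if '=' not in line:
--         return None, line
--     key, _, value = line.partition('=')
--     key = key.strip()
--     value = value.strip()
--     if not key or not value:
--         return None, None
--     key = toml_key(key)
--     if key is None:
--         return None, line
--     return key, value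
--
-- def toml_accumulated_value(acc, text):
--     if acc:
--         return "%s %s" % (acc, text)
--     return text
--
-- def is_toml_section(line):
--     if not line or len(line) < 3:
--         return False
--     if line[0] == '[' and line[-1] == ']':
--         line = line[1:-1]
--         if len(line) >= 3 and line[0] == '[' and line[-1] == ']':
--             line = line[1:-1]
--         return toml_key(line) is not None
--
-- def toml_key(text):
--     text = text and text.strip()
--     if not text or len(text) < 2:
--         return text
--     fc = text[0]
--     if fc == '"' or fc == "'":
--         if text[-1] != fc:
--             return None
--         return text[1:-1]
--     return text
--
-- def normalized_toml(lines):
--     """ Collapse toml multi-lines into one line (two-phase: segment, then emit) """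
--     if not lines:
--         return None
--     # Phase 1: split lines into segments; a new segment starts at every key line
--     # or section line.  The start line contributes its (stripped) value, every
--     # continuation line contributes the raw line.  The headless lead is the
--     # initial open segment with key None.
--     done = []              # closed segments: (key, members)
--     cur = (None, [])
--     for line in lines:
--         key, value = toml_key_value(line)
--         if key or is_toml_section(line):
--             done.append(cur)
--             cur = (key, [value])
--         else:
--             cur[1].append(line)
--     # Phase 2: fold each segment's members into one accumulated value and emit.
--     result = []
--     for key, members in done:
--         acc = None
--         for m in members:
--             acc = toml_accumulated_value(acc, m)
--         if acc:
--             result.append("%s=%s" % (key, acc) if key else acc)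
--     key, members = cur
--     if key:
--         acc = None
--         for m in members:
--             acc = toml_accumulated_value(acc, m)
--         result.append("%s=%s" % (key, acc))
--     return result
-- ===== Notes on version B (the rewrite author's own statement) =====
-- stated objective: alternative
-- what changed: Replaces A's single fused loop with mutable flush-on-start state (result, prev_key, acc) by a two-phase computation: phase 1 segments the lines at key/section start lines recording each segment's key and member texts, phase 2 folds every segment's members with toml_accumulated_value and emits the collapsed lines.
import Mathlib
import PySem

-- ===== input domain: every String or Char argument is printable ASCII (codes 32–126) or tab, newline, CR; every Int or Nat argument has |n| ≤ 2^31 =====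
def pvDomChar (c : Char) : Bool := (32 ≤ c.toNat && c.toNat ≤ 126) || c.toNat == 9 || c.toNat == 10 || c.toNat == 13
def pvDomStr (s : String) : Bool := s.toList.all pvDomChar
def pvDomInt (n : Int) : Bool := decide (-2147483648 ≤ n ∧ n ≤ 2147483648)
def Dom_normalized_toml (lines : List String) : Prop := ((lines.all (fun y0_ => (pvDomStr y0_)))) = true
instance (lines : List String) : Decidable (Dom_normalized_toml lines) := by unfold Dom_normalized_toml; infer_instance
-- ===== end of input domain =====

-- B re-decomposes A's fused collapse loop into two phases (segment at start
-- lines, then fold-and-emit each segment); same helpers, same return values.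

-- ===== PORT A =====
-- shared module helpers (used verbatim by both Pythons)

-- Python "%s" of an Optional[str] value (None prints as "None")
def pyStrOfOpt : Option String → String
  | none => "None"
  | some s => s

-- truthiness of an Optional[str]: None and "" are falsy
def otruthy : Option String → Bool
  | none => false
  | some s => s ≠ ""

-- toml_key(text); result None = Python None
def toml_key (text : String) : Option String :=
  let t := if text == "" then text else PySem.Str.strip text
  if t == "" || PySem.Str.len t < 2 then some t
  else
    match PySem.Str.pyGet? t 0, PySem.Str.pyGet? t (-1) with
    | some fc, some lc =>
      if fc == '"' || fc == '\'' then
        if lc != fc then none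
        else some (PySem.Str.slice t (some 1) (some (-1)))
      else some t
    | _, _ => some t   -- unreachable: len t ≥ 2

-- toml_key_value(line); key, _, value = line.partition('=') is ported as the
-- split at the first '=' (find + the two slices), exact since '=' ∈ line here
def toml_key_value (line : String) : Option String × Option String :=
  let l := if line == "" then line else PySem.Str.strip line
  if l == "" then (none, none)
  else if !(PySem.Str.isIn "=" l) then (none, some l)
  else
    let i := PySem.Str.find l "="
    let key := PySem.Str.strip (PySem.Str.slice l none (some i))
    let value := PySem.Str.strip (PySem.Str.slice l (some (i + 1)) none)
    if key == "" || value == "" then (none, none)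
    else
      match toml_key key with
      | none => (none, some l)
      | some k => (some k, some value)

-- toml_accumulated_value(acc, text); text kept Optional to match "%s" exactly
def toml_accumulated_value (acc : Option String) (text : Option String) : Option String :=
  if otruthy acc then some (pyStrOfOpt acc ++ " " ++ pyStrOfOpt text)
  else text

-- is_toml_section(line); Python's implicit 'return None' on a non-'[…]' line is falsy
def is_toml_section (line : String) : Bool :=
  if line == "" || PySem.Str.len line < 3 then false
  else if PySem.Str.pyGet? line 0 == some '[' && PySem.Str.pyGet? line (-1) == some ']' then
    let l := PySem.Str.slice line (some 1) (some (-1))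
    let l := if 3 ≤ PySem.Str.len l && PySem.Str.pyGet? l 0 == some '[' && PySem.Str.pyGet? l (-1) == some ']'
             then PySem.Str.slice l (some 1) (some (-1)) else l
    (toml_key l).isSome
  else false

-- one iteration of A's for-loop over (result, prev_key, acc)
def stepA (st : List String × Option String × Option String) (line : String) :
    List String × Option String × Option String :=
  let (result, prev_key, acc) := st
  let (key, value) := toml_key_value line
  if otruthy key || is_toml_section line then
    let (result, acc) :=
      if otruthy acc then
        (result ++ [if otruthy prev_key then pyStrOfOpt prev_key ++ "=" ++ pyStrOfOpt acc
                    else pyStrOfOpt acc], (none : Option String))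
      else (result, acc)
    (result, key, toml_accumulated_value acc value)
  else (result, prev_key, toml_accumulated_value acc (some line))

-- the final flush after A's loop
def finishA (st : List String × Option String × Option String) : List String :=
  let (result, prev_key, acc) := st
  if otruthy prev_key then result ++ [pyStrOfOpt prev_key ++ "=" ++ pyStrOfOpt acc]
  else result

def normalized_toml (lines : List String) : Option (List String) :=
  if lines == [] then none
  else some (finishA (lines.foldl stepA ([], none, none)))

-- ===== PORT B =====
-- a segment: its key (None for the headless lead / a section) and its member texts
-- phase 1: one scan closing a segment at every start line
def stepScanB (st : List (Option String × List (Option String)) × (Option String × List (Option String)))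
    (line : String) :
    List (Option String × List (Option String)) × (Option String × List (Option String)) :=
  let (done, cur) := st
  let (key, value) := toml_key_value line
  if otruthy key || is_toml_section line then (done ++ [cur], (key, [value]))
  else (done, (cur.1, cur.2 ++ [some line]))

-- fold a segment's members into one accumulated value
def foldMembersB (ms : List (Option String)) : Option String :=
  ms.foldl toml_accumulated_value none

-- phase 2, one closed segment: emit its collapsed line if the value is truthy
def emitSegB (result : List String) (seg : Option String × List (Option String)) : List String :=
  let acc := foldMembersB seg.2
  if otruthy acc then
    result ++ [if otruthy seg.1 then pyStrOfOpt seg.1 ++ "=" ++ pyStrOfOpt acc else pyStrOfOpt acc]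
  else result

-- phase 2 over all segments (the open last segment emits only when it has a key)
def emitAllB (st : List (Option String × List (Option String)) × (Option String × List (Option String))) :
    List String :=
  let (done, cur) := st
  let result := done.foldl emitSegB []
  if otruthy cur.1 then result ++ [pyStrOfOpt cur.1 ++ "=" ++ pyStrOfOpt (foldMembersB cur.2)]
  else result

def normalized_toml_alt (lines : List String) : Option (List String) :=
  if lines == [] then none
  else some (emitAllB (lines.foldl stepScanB ([], (none, []))))

-- ===== PRECONDITION & SPEC =====
def Spec_normalized_toml (lines : List String) (out : Option (List String)) : Prop := out = normalized_toml_alt lines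
instance (lines : List String) (out : Option (List String)) : Decidable (Spec_normalized_toml lines out) := by unfold Spec_normalized_toml; infer_instance

-- ===== CLAIM (what is proved, stated in full; the proofs are below) =====
def Claim_equal_normalized_toml : Prop := ∀ (lines : List String), Dom_normalized_toml lines → Spec_normalized_toml lines (normalized_toml lines)

-- ===== LEMMAS AND PROOFS =====

-- accumulating one more member is folding it onto the previous accumulator
theorem foldMembersB_append (ms : List (Option String)) (m : Option String) :
    foldMembersB (ms ++ [m]) = toml_accumulated_value (foldMembersB ms) m := by
  simp [foldMembersB]

-- a falsy accumulator (None or "") is simply replaced by the new text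
theorem tav_falsy (acc v : Option String) (h : otruthy acc = false) :
    toml_accumulated_value acc v = v := by
  simp [toml_accumulated_value, h]

-- the main invariant: emitting B's segments (an open segment whose members fold
-- to A's acc) equals finishing A's loop from the matching state
theorem mainInv (lines : List String) :
    ∀ (done : List (Option String × List (Option String))) (pk : Option String)
      (ms : List (Option String)),
    emitAllB (lines.foldl stepScanB (done, (pk, ms)))
      = finishA (lines.foldl stepA (done.foldl emitSegB [], pk, foldMembersB ms)) := by
  induction lines with
  | nil => intro done pk ms; rfl
  | cons line rest ih =>
    intro done pk ms
    simp only [List.foldl_cons, stepScanB, stepA]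
    by_cases hstart : (otruthy (toml_key_value line).1 || is_toml_section line) = true
    · rw [if_pos hstart, if_pos hstart, ih]
      have hm : foldMembersB [(toml_key_value line).2]
          = toml_accumulated_value none (toml_key_value line).2 := rfl
      by_cases hacc : otruthy (foldMembersB ms) = true
      · rw [if_pos hacc]
        simp only [List.foldl_append, List.foldl_cons, List.foldl_nil, hm]
        simp [emitSegB, hacc]
      · have hacc' : otruthy (foldMembersB ms) = false := by simpa using hacc
        rw [if_neg (by simp [hacc'])]
        simp only [List.foldl_append, List.foldl_cons, List.foldl_nil, hm]
        simp [emitSegB, hacc', tav_falsy _ _ hacc', tav_falsy none _ rfl]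
    · rw [if_neg hstart, if_neg hstart, ih, foldMembersB_append]

-- ===== VERDICT (by name: the statement is the Claim_ definition above) =====
theorem normalized_toml_spec : Claim_equal_normalized_toml := by
  intro lines _
  unfold Spec_normalized_toml normalized_toml normalized_toml_alt
  by_cases h : lines == []
  · simp [h]
  · simp only [h, Bool.false_eq_true]
    rw [mainInv lines [] none []]
    rfl
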